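-- pv_equiv track=rewrite | github.com/realitix/vulk | vulk/util.py | mipmap_levels
-- ===== SOURCE A (Python) =====
-- def mipmap_levels(base_width, base_height):
--     """Return max number of mipmap for the size
--
--     Args:
--         base_width (int): Width source
--         base_height (int): Height source
--
--     Returns:
--         int: Number of mipmap levels
--     """
--     width = base_width
--     height = base_height
--     levels = 1
--
--     while width > 1 or height > 1:
--         width = width // 2 or 1
--         height = height // 2 or 1
--         levels += 1
--
--     return levels
-- ===== SOURCE B (Python) =====
-- def mipmap_levels(base_width, base_height):
--     """Return max number of mipmap for the size (closed form, no loop)."""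
--     return max(base_width, base_height, 1).bit_length()
-- ===== Notes on version B (the rewrite author's own statement) =====
-- stated objective: simpler
-- what changed: Replaced the halving while-loop with the closed form max(base_width, base_height, 1).bit_length(), a single O(1) expression.
import Mathlib
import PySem

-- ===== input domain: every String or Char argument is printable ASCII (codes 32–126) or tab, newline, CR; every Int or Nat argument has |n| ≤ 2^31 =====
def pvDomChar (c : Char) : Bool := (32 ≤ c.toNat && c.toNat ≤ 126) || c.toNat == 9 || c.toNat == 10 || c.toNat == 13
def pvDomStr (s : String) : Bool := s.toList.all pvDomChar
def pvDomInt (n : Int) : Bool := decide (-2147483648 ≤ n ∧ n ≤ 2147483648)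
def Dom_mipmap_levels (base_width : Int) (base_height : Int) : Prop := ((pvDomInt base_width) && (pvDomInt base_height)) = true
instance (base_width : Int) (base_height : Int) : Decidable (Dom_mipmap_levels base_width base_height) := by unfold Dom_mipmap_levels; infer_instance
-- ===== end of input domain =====

-- B replaces A's halving while-loop with the closed form max(w, h, 1).bit_length() (simpler, loop-free).


-- ===== PORT A =====
-- while width > 1 or height > 1: width = width // 2 or 1; height = height // 2 or 1; levels += 1
-- (structural recursion on a fuel bound; the fuel only makes the same loop total — it is
--  never exhausted while the loop condition holds, proved in mipLoopF_eq below)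
def mipLoopF : Nat → Int → Int → Int → Int
  | 0, _, _, levels => levels
  | fuel + 1, width, height, levels =>
    if 1 < width ∨ 1 < height then
      mipLoopF fuel
        (if PySem.Int.floordiv width 2 = 0 then 1 else PySem.Int.floordiv width 2)
        (if PySem.Int.floordiv height 2 = 0 then 1 else PySem.Int.floordiv height 2)
        (levels + 1)
    else levels

def mipmap_levels (base_width : Int) (base_height : Int) : Int :=
  mipLoopF ((max base_width 1).toNat + (max base_height 1).toNat) base_width base_height 1

-- ===== PORT B =====
-- return max(base_width, base_height, 1).bit_length()
def mipmap_levels_alt (base_width : Int) (base_height : Int) : Int :=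
  ((PySem.Int.bitLength (max (max base_width base_height) 1) : Nat) : Int)

-- ===== PRECONDITION & SPEC =====
def Spec_mipmap_levels (base_width : Int) (base_height : Int) (out : Int) : Prop := out = mipmap_levels_alt base_width base_height
instance (base_width : Int) (base_height : Int) (out : Int) : Decidable (Spec_mipmap_levels base_width base_height out) := by unfold Spec_mipmap_levels; infer_instance

-- ===== CLAIM (what is proved, stated in full; the proofs are below) =====
def Claim_equal_mipmap_levels : Prop := ∀ (base_width : Int) (base_height : Int), Dom_mipmap_levels base_width base_height → Spec_mipmap_levels base_width base_height (mipmap_levels base_width base_height)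

-- ===== LEMMAS AND PROOFS =====

-- One loop step halves (with floor) the clamped maximum of the two dimensions.
lemma step_max (w h : Int) (hc : 1 < w ∨ 1 < h) :
    max (max (if PySem.Int.floordiv w 2 = 0 then 1 else PySem.Int.floordiv w 2)
             (if PySem.Int.floordiv h 2 = 0 then 1 else PySem.Int.floordiv h 2)) 1
      = PySem.Int.floordiv (max (max w h) 1) 2 := by
  rw [PySem.Int.floordiv_eq_ediv_of_pos (by omega : (0:Int) < 2),
      PySem.Int.floordiv_eq_ediv_of_pos (by omega : (0:Int) < 2),
      PySem.Int.floordiv_eq_ediv_of_pos (by omega : (0:Int) < 2)]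
  split_ifs <;> omega

-- With fuel at least the clamped sum of the dimensions, the loop computes:
-- initial levels, plus bit_length(max(w,h,1)) - 1 extra iterations.
lemma mipLoopF_eq (fuel : Nat) (w h levels : Int)
    (hf : (max w 1).toNat + (max h 1).toNat ≤ fuel) :
    mipLoopF fuel w h levels
      = levels - 1 + ((PySem.Int.bitLength (max (max w h) 1) : Nat) : Int) := by
  induction fuel generalizing w h levels with
  | zero => omega
  | succ fuel ih =>
    rw [mipLoopF]
    by_cases hc : 1 < w ∨ 1 < h
    · rw [if_pos hc, ih _ _ _ ?bound, step_max w h hc,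
          PySem.Int.bitLength_of_pos (by omega : (0:Int) < max (max w h) 1)]
      · push_cast; ring
      case bound =>
        rw [PySem.Int.floordiv_eq_ediv_of_pos (by omega : (0:Int) < 2),
            PySem.Int.floordiv_eq_ediv_of_pos (by omega : (0:Int) < 2)]
        split_ifs <;> omega
    · rw [if_neg hc]
      have hm : max (max w h) 1 = 1 := by omega
      rw [hm]
      have h1 : PySem.Int.bitLength 1 = 1 := by decide
      rw [h1]
      omega

-- ===== VERDICT (by name: the statement is the Claim_ definition above) =====
theorem mipmap_levels_spec : Claim_equal_mipmap_levels := by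
  intro w h _
  show mipmap_levels w h = mipmap_levels_alt w h
  unfold mipmap_levels mipmap_levels_alt
  rw [mipLoopF_eq _ _ _ _ (le_refl _)]
  omega
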